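-- pv_equiv track=rewrite | github.com/symeig/zle-py | src/zlepy/fgen.py | rebuildlists
-- ===== SOURCE A (Python) =====
-- def rebuildlists(k):
--     res=[]
--     lsts=[[1],[0]]
--     if ((k-1) == 0):
--         return lsts
--
--     for i in range(k-1):
--         res=[]
--         for j in lsts:
--             if j[-1]==1:
--                 res.append(j+[0])
--                 res.append(j+[1])
--             else:
--                 res.append(j+[1])
--         lsts=res
--     return res
-- ===== SOURCE B (Python) =====
-- def rebuildlists(k):
--     if k <= 0:
--         return []
--     out = []
--     stack = [[0], [1]]
--     while stack:
--         prefix = stack.pop()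
--         if len(prefix) == k:
--             out.append(prefix)
--         elif prefix[-1] == 1:
--             stack.append(prefix + [1])
--             stack.append(prefix + [0])
--         else:
--             stack.append(prefix + [1])
--     return out
-- ===== Notes on version B (the rewrite author's own statement) =====
-- stated objective: alternative
-- what changed: Replaced A's iterative level-by-level (BFS) rebuilding of the whole list of sequences with an explicit-stack depth-first search on a single growing prefix that appends each completed length-k sequence to the output; leaf order matches A's level order because all sequences share the same length and children are pushed so the zero-extension is visited first.
import Mathlib
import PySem

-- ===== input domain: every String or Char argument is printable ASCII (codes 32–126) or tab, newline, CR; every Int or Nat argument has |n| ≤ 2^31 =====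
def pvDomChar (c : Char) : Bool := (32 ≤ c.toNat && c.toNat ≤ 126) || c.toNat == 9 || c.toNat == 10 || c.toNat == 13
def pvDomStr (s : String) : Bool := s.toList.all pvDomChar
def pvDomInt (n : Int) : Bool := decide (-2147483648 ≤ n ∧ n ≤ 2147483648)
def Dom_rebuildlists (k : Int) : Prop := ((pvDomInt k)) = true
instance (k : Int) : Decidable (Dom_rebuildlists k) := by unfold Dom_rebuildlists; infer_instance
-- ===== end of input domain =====

-- B replaces A's level-by-level BFS rebuild of the whole list of sequences with an
-- explicit-stack DFS over one growing prefix (objective: alternative decomposition).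

-- ===== PORT A =====
-- one BFS expansion step: the inner 'for j in lsts' loop of A
def pvStep (lsts : List (List Int)) : List (List Int) :=
  lsts.foldl (fun res j =>
    if PySem.List.pyGet? j (-1) = some 1 then
      (res ++ [j ++ [0]]) ++ [j ++ [1]]
    else
      res ++ [j ++ [1]]) []

def rebuildlists (k : Int) : List (List Int) :=
  -- res=[]; lsts=[[1],[0]]
  if k - 1 = 0 then [[1], [0]]
  else
    -- for i in range(k-1): res = <inner loop over lsts>; lsts = res
    let st := (PySem.List.pyRange 0 (k - 1) 1).foldl
      (fun (st : List (List Int) × List (List Int)) _ =>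
        let res := pvStep st.2
        (res, res)) ([], [[1], [0]])
    st.1

-- ===== PORT B =====
-- explicit-stack DFS: the 'while stack' loop of Source B; the stack's TOP is the list HEAD
-- (python pushes +[1] then +[0], so +[0] ends nearer the top); fuel bounds the number of
-- loop iterations (2^(k+1) dominates the tree's node count, see pvNodes_le below)
def dfsLoop (fuel : Nat) (k : Int) (stack : List (List Int)) (out : List (List Int)) :
    List (List Int) :=
  match fuel, stack with
  | 0, _ => out
  | _ + 1, [] => out
  | n + 1, p :: rest =>
    if (p.length : Int) = k then dfsLoop n k rest (out ++ [p])
    else if PySem.List.pyGet? p (-1) = some 1 then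
      dfsLoop n k ((p ++ [0]) :: (p ++ [1]) :: rest) out
    else
      dfsLoop n k ((p ++ [1]) :: rest) out

def rebuildlists_alt (k : Int) : List (List Int) :=
  if k ≤ 0 then []
  else dfsLoop (2 ^ (k.toNat + 1)) k [[1], [0]] []

-- ===== PRECONDITION & SPEC =====
def Spec_rebuildlists (k : Int) (out : List (List Int)) : Prop := out = rebuildlists_alt k
instance (k : Int) (out : List (List Int)) : Decidable (Spec_rebuildlists k out) := by unfold Spec_rebuildlists; infer_instance

-- ===== CLAIM (what is proved, stated in full; the proofs are below) =====
def Claim_equal_rebuildlists : Prop := ∀ (k : Int), Dom_rebuildlists k → Spec_rebuildlists k (rebuildlists k)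

-- ===== LEMMAS AND PROOFS =====

-- the leaves of the expansion tree rooted at p, m levels deep (proof-side spec)
def pvLeaves (m : Nat) (p : List Int) : List (List Int) :=
  match m with
  | 0 => [p]
  | n + 1 =>
    if PySem.List.pyGet? p (-1) = some 1 then
      pvLeaves n (p ++ [0]) ++ pvLeaves n (p ++ [1])
    else
      pvLeaves n (p ++ [1])

def pvIter (m : Nat) (L : List (List Int)) : List (List Int) :=
  match m with
  | 0 => L
  | n + 1 => pvIter n (pvStep L)

theorem pvStep_eq_flatMap (L : List (List Int)) :
    pvStep L = L.flatMap (fun j =>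
      if PySem.List.pyGet? j (-1) = some 1 then [j ++ [0], j ++ [1]] else [j ++ [1]]) := by
  have h : ∀ (acc : List (List Int)),
      L.foldl (fun res j =>
        if PySem.List.pyGet? j (-1) = some 1 then
          (res ++ [j ++ [0]]) ++ [j ++ [1]]
        else
          res ++ [j ++ [1]]) acc
      = acc ++ L.flatMap (fun j =>
          if PySem.List.pyGet? j (-1) = some 1 then [j ++ [0], j ++ [1]] else [j ++ [1]]) := by
    induction L with
    | nil => simp
    | cons j L ih =>
      intro acc
      simp only [List.foldl_cons, List.flatMap_cons]
      by_cases hj : PySem.List.pyGet? j (-1) = some 1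
      · rw [if_pos hj, ih]; simp [hj, List.append_assoc]
      · rw [if_neg hj, ih]; simp [hj, List.append_assoc]
  unfold pvStep
  simpa using h []

theorem pvIter_flatMap_leaves (m : Nat) (L : List (List Int)) :
    pvIter m L = L.flatMap (pvLeaves m) := by
  induction m generalizing L with
  | zero => simp [pvIter, pvLeaves]
  | succ n ih =>
    rw [pvIter, ih, pvStep_eq_flatMap, List.flatMap_assoc]
    congr 1
    funext j
    by_cases hj : PySem.List.pyGet? j (-1) = some 1 <;> simp [hj, pvLeaves]

-- the pair-state fold of A equals pvIter (first component, after ≥ 1 iterations)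
theorem pvFold_eq_iter (l : List Int) (st : List (List Int) × List (List Int)) (hl : l ≠ []) :
    (l.foldl (fun (st : List (List Int) × List (List Int)) _ =>
        let res := pvStep st.2
        (res, res)) st).1 = pvIter l.length st.2 := by
  induction l generalizing st with
  | nil => exact absurd rfl hl
  | cons a l ih =>
    by_cases h : l = []
    · subst h; simp [pvIter]
    · simp only [List.foldl_cons, List.length_cons]
      rw [ih _ h]
      rfl

-- number of loop iterations the DFS spends on the subtree of p, m levels deep
def pvNodes (m : Nat) (p : List Int) : Nat :=
  match m with
  | 0 => 1
  | n + 1 =>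
    if PySem.List.pyGet? p (-1) = some 1 then
      1 + pvNodes n (p ++ [0]) + pvNodes n (p ++ [1])
    else
      1 + pvNodes n (p ++ [1])

theorem pvNodes_le (m : Nat) : ∀ (p : List Int), pvNodes m p ≤ 2 ^ (m + 1) - 1 := by
  induction m with
  | zero => intro p; simp [pvNodes]
  | succ n ih =>
    intro p
    have h2 : 1 ≤ 2 ^ (n + 1) := Nat.one_le_two_pow
    have hpow : 2 ^ (n + 1 + 1) = 2 ^ (n + 1) + 2 ^ (n + 1) := by ring
    by_cases hp : PySem.List.pyGet? p (-1) = some 1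
    · have := ih (p ++ [0]); have := ih (p ++ [1])
      simp only [pvNodes, hp, if_true]
      omega
    · have := ih (p ++ [1])
      simp only [pvNodes, hp, if_false]
      omega

theorem dfsLoop_nil (fuel : Nat) (k : Int) (out : List (List Int)) :
    dfsLoop fuel k [] out = out := by
  cases fuel <;> rfl

-- consuming one stack entry with enough fuel emits its leaves, then continues
theorem dfsLoop_consume (m : Nat) : ∀ (fuel : Nat) (k : Int) (p : List Int)
    (rest out : List (List Int)), pvNodes m p ≤ fuel → (p.length : Int) + m = k →
    dfsLoop fuel k (p :: rest) out
      = dfsLoop (fuel - pvNodes m p) k rest (out ++ pvLeaves m p) := by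
  induction m with
  | zero =>
    intro fuel k p rest out hf hk
    obtain ⟨n, rfl⟩ : ∃ n, fuel = n + 1 := ⟨fuel - 1, by simp [pvNodes] at hf; omega⟩
    have hpk : (p.length : Int) = k := by omega
    simp [dfsLoop, hpk, pvNodes, pvLeaves]
  | succ m ih =>
    intro fuel k p rest out hf hk
    have hone : 1 ≤ pvNodes (m + 1) p := by
      unfold pvNodes; split <;> omega
    obtain ⟨n, rfl⟩ : ∃ n, fuel = n + 1 := ⟨fuel - 1, by omega⟩
    have hne : ¬ ((p.length : Int) = k) := by omega
    have h0 : ((p ++ [(0:Int)]).length : Int) + m = k := by simp; omega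
    have h1 : ((p ++ [(1:Int)]).length : Int) + m = k := by simp; omega
    by_cases hp : PySem.List.pyGet? p (-1) = some 1
    · have hfs : pvNodes (m + 1) p = 1 + pvNodes m (p ++ [0]) + pvNodes m (p ++ [1]) := by
        simp [pvNodes, hp]
      simp only [dfsLoop, hne, if_false, hp, if_true]
      rw [ih n k _ _ out (by omega) h0,
          ih _ k _ rest _ (by omega) h1,
          pvLeaves, if_pos hp]
      congr 1
      · omega
      · simp [List.append_assoc]
    · have hfs : pvNodes (m + 1) p = 1 + pvNodes m (p ++ [1]) := by
        simp [pvNodes, hp]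
      simp only [dfsLoop, hne, if_false, hp]
      rw [ih n k _ rest out (by omega) h1, pvLeaves, if_neg hp]
      congr 1
      omega

-- ===== VERDICT (by name: the statement is the Claim_ definition above) =====
theorem rebuildlists_spec : Claim_equal_rebuildlists := by
  intro k _
  unfold Spec_rebuildlists rebuildlists rebuildlists_alt
  by_cases hk0 : k ≤ 0
  · have h1 : ¬ (k - 1 = 0) := by omega
    have h2 : PySem.List.pyRange 0 (k - 1) 1 = [] := by
      have h0 : (k - 1 - 0).toNat = 0 := by omega
      rw [PySem.List.pyRange_one, h0]
      rfl
    simp [h1, h2, hk0]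
  · -- k ≥ 1
    have hkn : ¬ (k ≤ 0) := hk0
    set m : Nat := (k - 1).toNat with hm
    have hmk1 : (([(1:Int)] : List Int).length : Int) + m = k := by simp; omega
    have hmk0 : (([(0:Int)] : List Int).length : Int) + m = k := by simp; omega
    have hexp : k.toNat + 1 = m + 2 := by omega
    have hb1 : pvNodes m [1] ≤ 2 ^ (m + 1) - 1 := pvNodes_le m [1]
    have hb0 : pvNodes m [0] ≤ 2 ^ (m + 1) - 1 := pvNodes_le m [0]
    have hpow : 2 ^ (m + 2) = 2 ^ (m + 1) + 2 ^ (m + 1) := by ring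
    have h2 : 1 ≤ 2 ^ (m + 1) := Nat.one_le_two_pow
    have hB : dfsLoop (2 ^ (k.toNat + 1)) k [[1], [0]] []
        = pvLeaves m [1] ++ pvLeaves m [0] := by
      rw [hexp, dfsLoop_consume m _ k [1] [[0]] [] (by omega) hmk1,
          dfsLoop_consume m _ k [0] [] _ (by omega) hmk0, dfsLoop_nil]
      simp
    by_cases hk1 : k - 1 = 0
    · have : m = 0 := by omega
      simp [hk1, hkn, hB, this, pvLeaves]
    · have hrange : (PySem.List.pyRange 0 (k - 1) 1).length = m := by
        rw [PySem.List.length_pyRange_one]; omega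
      have hne : PySem.List.pyRange 0 (k - 1) 1 ≠ [] := by
        intro h
        rw [h] at hrange
        simp at hrange
        omega
      simp only [hk1, if_false, hkn, if_false]
      rw [pvFold_eq_iter _ _ hne, hrange, pvIter_flatMap_leaves, hB]
      simp
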